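-- pv_equiv track=rewrite | github.com/YurenHao0426/PutnamGAP | tools/unicode_clean.py | _read_latex_command
-- ===== SOURCE A (Python) =====
-- def _read_balanced(s: str, i: int, open_ch: str, close_ch: str):
--     depth = 0
--     j = i
--     while j < len(s):
--         if s[j] == open_ch:
--             depth += 1
--         elif s[j] == close_ch:
--             depth -= 1
--             if depth == 0:
--                 return j + 1
--         j += 1
--     return -1
--
-- def _read_latex_command(s: str, i: int):
--     if i >= len(s) or s[i] != "\\":
--         return -1
--     j = i + 1
--     while j < len(s) and (s[j].isalpha() or s[j] == "@"):
--         j += 1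
--     while j < len(s) and s[j] == "{":
--         end = _read_balanced(s, j, "{", "}")
--         if end == -1:
--             return j
--         j = end
--     return j
-- ===== SOURCE B (Python) =====
-- def _read_latex_command(s, i):
--     n = len(s)
--     if i >= n or s[i] != "\\":
--         return -1
--     # pass 1: match every brace in the whole string once, with a stack
--     match = {}
--     stack = []
--     for k, c in enumerate(s):
--         if c == "{":
--             stack.append(k)
--         elif c == "}" and stack:
--             match[stack.pop()] = k
--     # pass 2: scan the command name
--     j = i + 1
--     while j < n and (s[j].isalpha() or s[j] == "@"):
--         j += 1
--     # pass 3: hop over the argument groups via the match table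
--     while j < n and s[j] == "{":
--         if j not in match:
--             return j
--         j = match[j] + 1
--     return j
-- ===== Notes on version B (the rewrite author's own statement) =====
-- stated objective: alternative
-- what changed: A consumes each top-level argument group by rescanning it with a depth-counter helper; B first builds a brace-matching table for the whole string in one stack-based pass and then hops from each '{' directly to the index after its matching '}' by table lookup.
-- outside the precondition, e.g. on _read_latex_command('\\a{b}', -5): A returns 0, B returns -3; on _read_latex_command('ab', -5): A raises IndexError, B raises IndexError
import Mathlib
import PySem

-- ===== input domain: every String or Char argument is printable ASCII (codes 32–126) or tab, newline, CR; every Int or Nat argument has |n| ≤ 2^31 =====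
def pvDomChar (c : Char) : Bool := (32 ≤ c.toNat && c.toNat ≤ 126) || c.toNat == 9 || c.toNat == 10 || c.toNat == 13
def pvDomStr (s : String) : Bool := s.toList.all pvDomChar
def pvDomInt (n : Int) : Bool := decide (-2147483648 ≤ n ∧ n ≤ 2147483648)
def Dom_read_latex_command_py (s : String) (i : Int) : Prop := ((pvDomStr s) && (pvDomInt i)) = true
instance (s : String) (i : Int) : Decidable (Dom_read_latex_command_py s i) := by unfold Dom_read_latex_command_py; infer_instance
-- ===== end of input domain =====

-- B replaces A's per-group depth-counter rescans by one stack-based pass that tabulates the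
-- matching '}' of every '{' in the string, then hops over each argument group by table lookup;
-- same O(n) cost — objective: alternative.


-- ===== PORT A =====
-- Python's s[j].isalpha() or s[j] == "@" (exact on the ASCII domain)
def pvNameChar (c : Char) : Bool := PySem.Chars.isalpha c || c == '@'

-- _read_balanced's while loop (depth, j are the loop state), with the trip count
-- (len - j) as structural fuel (the loop advances j by 1 each iteration, so the fuel is
-- exact, not a behaviour change); the `.getD ' '` arm is unreachable inside Pre_
-- (there Python would raise IndexError)
def pvReadBalancedGo (cs : List Char) (openc closec : Char) : Nat → Int → Int → Int
  | 0, _, _ => -1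
  | n + 1, depth, j =>
    let c := (PySem.List.pyGet? cs j).getD ' '
    if c = openc then pvReadBalancedGo cs openc closec n (depth + 1) (j + 1)
    else if c = closec then
      if depth - 1 = 0 then j + 1 else pvReadBalancedGo cs openc closec n (depth - 1) (j + 1)
    else pvReadBalancedGo cs openc closec n depth (j + 1)

def pvReadBalanced (cs : List Char) (openc closec : Char) (depth j : Int) : Int :=
  pvReadBalancedGo cs openc closec ((cs.length : Int) - j).toNat depth j

-- the name-scanning while loop 'while j < len(s) and (s[j].isalpha() or s[j] == "@")',
-- identical source text in A and in B, so both ports share it (fuel = trip count, exact)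
def pvNameLoopGo (cs : List Char) : Nat → Int → Int
  | 0, j => j
  | n + 1, j =>
    if pvNameChar ((PySem.List.pyGet? cs j).getD ' ') then pvNameLoopGo cs n (j + 1) else j

def pvNameLoop (cs : List Char) (j : Int) : Int :=
  pvNameLoopGo cs ((cs.length : Int) - j).toNat j

-- second while loop of _read_latex_command; the loop jumps j to the end of each group, so
-- (len - j) iterations are an upper bound: the fuel carries the real loop guard j < len
def pvBraceLoopAGo (cs : List Char) : Nat → Int → Int
  | 0, j => j
  | n + 1, j =>
    if j < (cs.length : Int) then
      if (PySem.List.pyGet? cs j).getD ' ' = '{' then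
        let e := pvReadBalanced cs '{' '}' 0 j
        if e = -1 then j else pvBraceLoopAGo cs n e
      else j
    else j

def pvBraceLoopA (cs : List Char) (j : Int) : Int :=
  pvBraceLoopAGo cs ((cs.length : Int) - j).toNat j

def read_latex_command_py (s : String) (i : Int) : Int :=
  let cs := s.toList
  if i ≥ (cs.length : Int) then -1
  else
    match PySem.List.pyGet? cs i with
    | none => -1   -- Python raises IndexError here; excluded by Pre_
    | some c =>
      if c ≠ '\\' then -1
      else pvBraceLoopA cs (pvNameLoop cs (i + 1))

-- ===== PORT B =====
-- B's pass 1: 'for k, c in enumerate(s)' building the match table with a stack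
-- (Python list append/pop at the end = cons/uncons at the head of the Lean list)
def pvBuildGo : Int → List Char → PySem.Dict Int Int → List Int → PySem.Dict Int Int × List Int
  | _, [], d, stk => (d, stk)
  | k, c :: rest, d, stk =>
    if c = '{' then pvBuildGo (k + 1) rest d (k :: stk)
    else if c = '}' then
      match stk with
      | [] => pvBuildGo (k + 1) rest d []
      | p :: tl => pvBuildGo (k + 1) rest (d.insert p k) tl
    else pvBuildGo (k + 1) rest d stk

def pvMatchDict (cs : List Char) : PySem.Dict Int Int :=
  (pvBuildGo 0 cs PySem.Dict.empty []).1

-- B's pass 3: hop from each top-level '{' to just past its matching '}' via the table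
-- (fuel = len - j is an upper bound on the trips: each hop moves j strictly forward)
def pvHopGo (cs : List Char) (d : PySem.Dict Int Int) : Nat → Int → Int
  | 0, j => j
  | n + 1, j =>
    if j < (cs.length : Int) then
      if (PySem.List.pyGet? cs j).getD ' ' = '{' then
        match d.get? j with
        | none => j
        | some m => pvHopGo cs d n (m + 1)
      else j
    else j

def pvHop (cs : List Char) (d : PySem.Dict Int Int) (j : Int) : Int :=
  pvHopGo cs d ((cs.length : Int) - j).toNat j

def read_latex_command_py_alt (s : String) (i : Int) : Int :=
  let cs := s.toList
  if i ≥ (cs.length : Int) then -1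
  else
    match PySem.List.pyGet? cs i with
    | none => -1   -- Python raises IndexError here; excluded by Pre_
    | some c =>
      if c ≠ '\\' then -1
      else pvHop cs (pvMatchDict cs) (pvNameLoop cs (i + 1))

-- ===== PRECONDITION & SPEC =====
-- Pre_ restricts to nonnegative scan positions, the function's natural domain: for i < -len(s)
-- A raises IndexError, and for -len(s) ≤ i < 0 A's value is an accident of Python's
-- negative-index wraparound (the scan jumps from s[-1] back to s[0]) that B's match table
-- does not reproduce.
def Pre_read_latex_command_py (s : String) (i : Int) : Prop := 0 ≤ i
instance (s : String) (i : Int) : Decidable (Pre_read_latex_command_py s i) := by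
  unfold Pre_read_latex_command_py; infer_instance

def pvWitness_read_latex_command_py : String × Int := ("\\frac{a}{b}", 0)

def Spec_read_latex_command_py (s : String) (i : Int) (out : Int) : Prop := out = read_latex_command_py_alt s i
instance (s : String) (i : Int) (out : Int) : Decidable (Spec_read_latex_command_py s i out) := by unfold Spec_read_latex_command_py; infer_instance

-- ===== CLAIM (what is proved, stated in full; the proofs are below) =====
def Claim_equal_read_latex_command_py : Prop := ∀ (s : String) (i : Int), Dom_read_latex_command_py s i → Pre_read_latex_command_py s i → Spec_read_latex_command_py s i (read_latex_command_py s i)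

-- ===== LEMMAS AND PROOFS =====

theorem pvReadBalanced_unfold (cs : List Char) (openc closec : Char) (depth j : Int) :
    pvReadBalanced cs openc closec depth j =
      if j < (cs.length : Int) then
        (let c := (PySem.List.pyGet? cs j).getD ' '
         if c = openc then pvReadBalanced cs openc closec (depth + 1) (j + 1)
         else if c = closec then
           if depth - 1 = 0 then j + 1 else pvReadBalanced cs openc closec (depth - 1) (j + 1)
         else pvReadBalanced cs openc closec depth (j + 1))
      else -1 := by
  by_cases h : j < (cs.length : Int)
  · have ht : ((cs.length : Int) - j).toNat = ((cs.length : Int) - (j + 1)).toNat + 1 := by omega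
    rw [pvReadBalanced, ht, if_pos h]; rfl
  · have ht : ((cs.length : Int) - j).toNat = 0 := by omega
    rw [pvReadBalanced, ht, if_neg h]; rfl

-- _read_balanced returns -1 or an index past j (used for fuel bounds on both sides)
theorem pvReadBalanced_pos (cs : List Char) (openc closec : Char) (depth j : Int) :
    pvReadBalanced cs openc closec depth j = -1 ∨ j < pvReadBalanced cs openc closec depth j := by
  suffices H : ∀ (n : Nat) (depth j : Int), pvReadBalancedGo cs openc closec n depth j = -1 ∨
      j < pvReadBalancedGo cs openc closec n depth j by
    exact H _ depth j
  intro n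
  induction n with
  | zero => intro depth j; left; rfl
  | succ n ih =>
    intro depth j
    simp only [pvReadBalancedGo]
    split_ifs with h1 h2 h3
    · rcases ih (depth + 1) (j + 1) with h | h <;> [left; right] <;> first | exact h | omega
    · right; omega
    · rcases ih (depth - 1) (j + 1) with h | h <;> [left; right] <;> first | exact h | omega
    · rcases ih depth (j + 1) with h | h <;> [left; right] <;> first | exact h | omega

-- later steps of the builder never touch the entry of a key absent from the current stack
theorem pvBuildGo_get?_stable :
    ∀ (rest : List Char) (k : Int) (d : PySem.Dict Int Int) (stk : List Int) (p : Int),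
      p ∉ stk → p < k → (pvBuildGo k rest d stk).1.get? p = d.get? p := by
  intro rest
  induction rest with
  | nil => intro k d stk p _ _; rfl
  | cons c rest ih =>
    intro k d stk p hp hpk
    simp only [pvBuildGo]
    split_ifs with h1 h2
    · rw [ih (k + 1) d (k :: stk) p (by simp only [List.mem_cons, not_or]; exact ⟨by omega, hp⟩) (by omega)]
    · cases stk with
      | nil => rw [ih (k + 1) d [] p (by simp) (by omega)]
      | cons q tl =>
        rw [ih (k + 1) (d.insert q k) tl p (fun h => hp (List.mem_cons_of_mem _ h)) (by omega)]
        exact PySem.Dict.get?_insert_of_ne d k (by intro h; exact hp (h ▸ List.mem_cons_self ..)) 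
    · exact ih (k + 1) d stk p hp (by omega)

-- every value ever inserted is a nonnegative position
theorem pvBuildGo_get?_nonneg :
    ∀ (rest : List Char) (k : Int) (d : PySem.Dict Int Int) (stk : List Int),
      0 ≤ k → (∀ q m, d.get? q = some m → 0 ≤ m) →
      ∀ j m, (pvBuildGo k rest d stk).1.get? j = some m → 0 ≤ m := by
  intro rest
  induction rest with
  | nil => intro k d stk _ hd j m h; exact hd j m h
  | cons c rest ih =>
    intro k d stk hk hd j m h
    simp only [pvBuildGo] at h
    split_ifs at h with h1 h2
    · exact ih (k + 1) d (k :: stk) (by omega) hd j m h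
    · cases stk with
      | nil => exact ih (k + 1) d [] (by omega) hd j m h
      | cons q tl =>
        refine ih (k + 1) (d.insert q k) tl (by omega) ?_ j m h
        intro q' m' hq'
        rw [PySem.Dict.get?_insert] at hq'
        split_ifs at hq' with he
        · cases hq'; omega
        · exact hd q' m' hq'
    · exact ih (k + 1) d stk (by omega) hd j m h

-- core invariant: running the builder over the suffix cs[k:], with stack stk (top first),
-- the depth-counter scan at depth idx+1 from k computes exactly the final match entry of
-- the stack element stk[idx]
theorem pvBuildGo_spec (cs : List Char) :
    ∀ (rest : List Char) (k : Int) (d : PySem.Dict Int Int) (stk : List Int),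
      0 ≤ k → rest = cs.drop k.toNat → k.toNat ≤ cs.length →
      stk.Nodup → (∀ p ∈ stk, 0 ≤ p ∧ p < k ∧ d.contains p = false) →
      (∀ q ∈ d.keys, q < k) →
      ∀ (idx : Nat) (h : idx < stk.length),
        pvReadBalanced cs '{' '}' ((idx : Int) + 1) k =
          (match (pvBuildGo k rest d stk).1.get? stk[idx] with
           | some m => m + 1
           | none => -1) := by
  intro rest
  induction rest with
  | nil =>
    intro k d stk hk hrest hlen hnd hstk hkeys idx h
    have hge : cs.length ≤ k.toNat := List.drop_eq_nil_iff.mp hrest.symm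
    have hkl : k = (cs.length : Int) := by omega
    rw [pvReadBalanced_unfold, if_neg (by omega)]
    simp only [pvBuildGo]
    have hc : d.contains stk[idx] = false := (hstk _ (stk.getElem_mem h)).2.2
    rw [(PySem.Dict.get?_eq_none_iff_contains d stk[idx]).mpr hc]
  | cons c rest ih =>
    intro k d stk hk hrest hlen hnd hstk hkeys idx h
    have hlt : k.toNat < cs.length := by
      have := congrArg List.length hrest
      simp [List.length_drop] at this; omega
    have hget : PySem.List.pyGet? cs k = some c := by
      rw [PySem.List.pyGet?_of_nonneg cs hk]
      have h0 : (cs.drop k.toNat)[0]? = some c := by rw [← hrest]; rfl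
      rw [List.getElem?_drop] at h0
      simpa using h0
    have hrest' : rest = cs.drop (k + 1).toNat := by
      have : (k + 1).toNat = k.toNat + 1 := by omega
      rw [this, ← List.drop_drop]
      rw [← hrest]; rfl
    rw [pvReadBalanced_unfold, if_pos (by omega)]
    simp only [hget, Option.getD_some]
    simp only [pvBuildGo]
    by_cases h1 : c = '{'
    · rw [if_pos h1, if_pos h1]
      have := ih (k + 1) d (k :: stk) (by omega) hrest' (by omega)
        (by
          refine List.nodup_cons.mpr ⟨?_, hnd⟩
          intro hmem; have := (hstk _ hmem).2.1; omega)
        (by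
          intro p hp
          rcases List.mem_cons.mp hp with hp | hp
          · rw [hp]
            refine ⟨hk, by omega, ?_⟩
            cases hcon : d.contains k with
            | true => exact absurd (hkeys k ((PySem.Dict.contains_iff_mem_keys d k).mp hcon)) (by omega)
            | false => rfl
          · have := hstk p hp; exact ⟨this.1, by omega, this.2.2⟩)
        (by intro q hq; have := hkeys q hq; omega)
        (idx + 1) (by simpa using h)
      simpa using this
    · rw [if_neg h1, if_neg h1]
      by_cases h2 : c = '}'
      · rw [if_pos h2, if_pos h2]
        cases stk with
        | nil => simp at h
        | cons p tl =>
          cases idx with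
          | zero =>
            rw [if_pos (by omega)]
            have hstable : (pvBuildGo (k + 1) rest (d.insert p k) tl).1.get? p =
                (d.insert p k).get? p := by
              refine pvBuildGo_get?_stable rest (k + 1) (d.insert p k) tl p ?_ ?_
              · exact (List.nodup_cons.mp hnd).1
              · have := hstk p (List.mem_cons_self ..); omega
            simp only [List.getElem_cons_zero, hstable, PySem.Dict.get?_insert_self]
          | succ i =>
            rw [if_neg (by omega)]
            have := ih (k + 1) (d.insert p k) tl (by omega) hrest' (by omega)
              (List.nodup_cons.mp hnd).2
              (by
                intro q hq
                have hq' := hstk q (List.mem_cons_of_mem _ hq)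
                refine ⟨hq'.1, by omega, ?_⟩
                rw [PySem.Dict.contains_insert]
                have hne : q ≠ p := by
                  intro he; exact (List.nodup_cons.mp hnd).1 (he ▸ hq)
                simp [hne, hq'.2.2])
              (by
                intro q hq
                rcases (PySem.Dict.mem_keys_insert _ _ _ _).mp hq with hq | hq
                · rw [hq]; have := hstk p (List.mem_cons_self ..); omega
                · have := hkeys q hq; omega)
              i (by simpa using h)
            simp only [List.getElem_cons_succ]
            have hc2 : ((i + 1 : Nat) : Int) + 1 - 1 = (i : Int) + 1 := by push_cast; ring
            rw [hc2]
            exact this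
      · rw [if_neg h2, if_neg h2]
        exact ih (k + 1) d stk (by omega) hrest' (by omega) hnd
          (by intro p hp; have := hstk p hp; exact ⟨this.1, by omega, this.2.2⟩) 
          (by intro q hq; have := hkeys q hq; omega) idx h

-- the match table computes _read_balanced: at any '{', the scan from depth 0 returns
-- (matching index) + 1, or -1 exactly when the table has no entry
theorem matchDict_spec (cs : List Char) :
    ∀ (rest : List Char) (k : Int) (d : PySem.Dict Int Int) (stk : List Int),
      0 ≤ k → rest = cs.drop k.toNat → k.toNat ≤ cs.length →
      stk.Nodup → (∀ p ∈ stk, 0 ≤ p ∧ p < k ∧ d.contains p = false) →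
      (∀ q ∈ d.keys, q < k) →
      ∀ j, k ≤ j → PySem.List.pyGet? cs j = some '{' →
        pvReadBalanced cs '{' '}' 0 j =
          (match (pvBuildGo k rest d stk).1.get? j with
           | some m => m + 1
           | none => -1) := by
  intro rest
  induction rest with
  | nil =>
    intro k d stk hk hrest hlen hnd hstk hkeys j hj hjget
    have hge : cs.length ≤ k.toNat := List.drop_eq_nil_iff.mp hrest.symm
    rw [PySem.List.pyGet?_of_nonneg cs (by omega)] at hjget
    rw [List.getElem?_eq_none (by omega)] at hjget
    exact absurd hjget (by simp)
  | cons c rest ih =>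
    intro k d stk hk hrest hlen hnd hstk hkeys j hj hjget
    have hlt : k.toNat < cs.length := by
      have := congrArg List.length hrest
      simp [List.length_drop] at this; omega
    have hget : PySem.List.pyGet? cs k = some c := by
      rw [PySem.List.pyGet?_of_nonneg cs hk]
      have h0 : (cs.drop k.toNat)[0]? = some c := by rw [← hrest]; rfl
      rw [List.getElem?_drop] at h0
      simpa using h0
    have hrest' : rest = cs.drop (k + 1).toNat := by
      have : (k + 1).toNat = k.toNat + 1 := by omega
      rw [this, ← List.drop_drop]
      rw [← hrest]; rfl
    simp only [pvBuildGo]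
    by_cases hjk : j = k
    · subst hjk
      have hcb : c = '{' := by rw [hget] at hjget; exact Option.some_inj.mp hjget
      rw [if_pos hcb]
      rw [pvReadBalanced_unfold, if_pos (by omega)]
      simp only [hget, Option.getD_some, if_pos hcb]
      have := pvBuildGo_spec cs rest (j + 1) d (j :: stk) (by omega) hrest' (by omega)
        (by
          refine List.nodup_cons.mpr ⟨?_, hnd⟩
          intro hmem; have := (hstk _ hmem).2.1; omega)
        (by
          intro p hp
          rcases List.mem_cons.mp hp with hp | hp
          · rw [hp]
            refine ⟨hk, by omega, ?_⟩
            cases hcon : d.contains j with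
            | true => exact absurd (hkeys j ((PySem.Dict.contains_iff_mem_keys d j).mp hcon)) (by omega)
            | false => rfl
          · have := hstk p hp; exact ⟨this.1, by omega, this.2.2⟩)
        (by intro q hq; have := hkeys q hq; omega)
        0 (by simp)
      simpa using this
    · have hjk' : k + 1 ≤ j := by omega
      split_ifs with h1 h2
      · exact ih (k + 1) d (k :: stk) (by omega) hrest' (by omega)
          (by
            refine List.nodup_cons.mpr ⟨?_, hnd⟩
            intro hmem; have := (hstk _ hmem).2.1; omega)
          (by
            intro p hp
            rcases List.mem_cons.mp hp with hp | hp
            · rw [hp]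
              refine ⟨hk, by omega, ?_⟩
              cases hcon : d.contains k with
              | true => exact absurd (hkeys k ((PySem.Dict.contains_iff_mem_keys d k).mp hcon)) (by omega)
              | false => rfl
            · have := hstk p hp; exact ⟨this.1, by omega, this.2.2⟩)
          (by intro q hq; have := hkeys q hq; omega) j hjk' hjget
      · cases stk with
        | nil =>
          show pvReadBalanced cs '{' '}' 0 j =
            (match (pvBuildGo (k + 1) rest d []).1.get? j with
             | some m => m + 1 | none => -1)
          exact ih (k + 1) d [] (by omega) hrest' (by omega) (by simp) (by simp)
            (by intro q hq; have := hkeys q hq; omega) j hjk' hjget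
        | cons p tl =>
          show pvReadBalanced cs '{' '}' 0 j =
            (match (pvBuildGo (k + 1) rest (d.insert p k) tl).1.get? j with
             | some m => m + 1 | none => -1)
          exact ih (k + 1) (d.insert p k) tl (by omega) hrest' (by omega)
            (List.nodup_cons.mp hnd).2
            (by
              intro q hq
              have hq' := hstk q (List.mem_cons_of_mem _ hq)
              refine ⟨hq'.1, by omega, ?_⟩
              rw [PySem.Dict.contains_insert]
              have hne : q ≠ p := by
                intro he; exact (List.nodup_cons.mp hnd).1 (he ▸ hq)
              simp [hne, hq'.2.2])
            (by
              intro q hq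
              rcases (PySem.Dict.mem_keys_insert _ _ _ _).mp hq with hq | hq
              · rw [hq]; have := hstk p (List.mem_cons_self ..); omega
              · have := hkeys q hq; omega) j hjk' hjget
      · exact ih (k + 1) d stk (by omega) hrest' (by omega) hnd
          (by intro p hp; have := hstk p hp; exact ⟨this.1, by omega, this.2.2⟩)
          (by intro q hq; have := hkeys q hq; omega) j hjk' hjget

theorem matchDict_eq_readBalanced (cs : List Char) (j : Int) (hj : 0 ≤ j)
    (hjget : PySem.List.pyGet? cs j = some '{') :
    pvReadBalanced cs '{' '}' 0 j =
      (match (pvMatchDict cs).get? j with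
       | some m => m + 1
       | none => -1) :=
  matchDict_spec cs cs 0 PySem.Dict.empty [] le_rfl rfl (by omega) (by simp) (by simp)
    (by simp [PySem.Dict.empty, PySem.Dict.keys]) j hj hjget

theorem matchDict_nonneg (cs : List Char) (j m : Int) (h : (pvMatchDict cs).get? j = some m) :
    0 ≤ m :=
  pvBuildGo_get?_nonneg cs 0 PySem.Dict.empty [] le_rfl
    (by intro q m' hq; rw [PySem.Dict.get?_empty] at hq; cases hq) j m h

-- a table hit at a '{' moves j strictly forward (for the hop loop's fuel bound)
theorem matchDict_forward (cs : List Char) (j m : Int) (hj : 0 ≤ j)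
    (hjget : PySem.List.pyGet? cs j = some '{') (h : (pvMatchDict cs).get? j = some m) :
    j < m + 1 := by
  have hs := matchDict_eq_readBalanced cs j hj hjget
  rw [h] at hs
  have hs2 : pvReadBalanced cs '{' '}' 0 j = m + 1 := by rw [hs]
  rcases pvReadBalanced_pos cs '{' '}' 0 j with h' | h'
  · have := matchDict_nonneg cs j m h; omega
  · omega

theorem pvNameLoop_unfold (cs : List Char) (j : Int) :
    pvNameLoop cs j =
      if j < (cs.length : Int) then
        (if pvNameChar ((PySem.List.pyGet? cs j).getD ' ') then pvNameLoop cs (j + 1) else j)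
      else j := by
  by_cases h : j < (cs.length : Int)
  · have ht : ((cs.length : Int) - j).toNat = ((cs.length : Int) - (j + 1)).toNat + 1 := by omega
    rw [pvNameLoop, ht, if_pos h]; rfl
  · have ht : ((cs.length : Int) - j).toNat = 0 := by omega
    rw [pvNameLoop, ht, if_neg h]; rfl

theorem nameLoop_ge (cs : List Char) (j : Int) : j ≤ pvNameLoop cs j := by
  rw [pvNameLoop_unfold]
  by_cases h : j < (cs.length : Int)
  · rw [if_pos h]
    by_cases hc : pvNameChar ((PySem.List.pyGet? cs j).getD ' ') = true
    · rw [if_pos hc]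
      have := nameLoop_ge cs (j + 1)
      omega
    · rw [if_neg hc]
  · simp [h]
termination_by ((cs.length : Int) - j).toNat
decreasing_by omega

-- helper for the two loop-unfold lemmas below: a getD-'{' hit is a genuine pyGet? hit
theorem pyGet_brace (cs : List Char) (j : Int) (hj : 0 ≤ j) (hlt : j < (cs.length : Int))
    (h : (PySem.List.pyGet? cs j).getD ' ' = '{') : PySem.List.pyGet? cs j = some '{' := by
  rw [PySem.List.pyGet?_of_nonneg cs hj] at h ⊢
  rw [List.getElem?_eq_getElem (by omega)] at h ⊢
  simpa using h

-- surplus fuel is irrelevant once it covers the remaining trip count (A's group loop)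
theorem pvBraceLoopAGo_irrel (cs : List Char) :
    ∀ (n m : Nat) (j : Int), ((cs.length : Int) - j).toNat ≤ n →
      ((cs.length : Int) - j).toNat ≤ m → pvBraceLoopAGo cs n j = pvBraceLoopAGo cs m j := by
  intro n
  induction n with
  | zero =>
    intro m j hn hm
    cases m with
    | zero => rfl
    | succ m =>
      show pvBraceLoopAGo cs 0 j = if j < (cs.length : Int) then _ else j
      rw [if_neg (by omega)]; rfl
  | succ n ih =>
    intro m j hn hm
    cases m with
    | zero =>
      show (if j < (cs.length : Int) then _ else j) = pvBraceLoopAGo cs 0 j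
      rw [if_neg (by omega)]; rfl
    | succ m =>
      show (if j < (cs.length : Int) then _ else j) = if j < (cs.length : Int) then _ else j
      by_cases h : j < (cs.length : Int)
      · rw [if_pos h, if_pos h]
        by_cases h1 : (PySem.List.pyGet? cs j).getD ' ' = '{'
        · rw [if_pos h1, if_pos h1]
          by_cases he : pvReadBalanced cs '{' '}' 0 j = -1
          · simp [he]
          · simp only [he, if_false]
            rcases pvReadBalanced_pos cs '{' '}' 0 j with h' | h'
            · exact absurd h' he
            · exact ih m (pvReadBalanced cs '{' '}' 0 j) (by omega) (by omega)
        · rw [if_neg h1, if_neg h1]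
      · rw [if_neg h, if_neg h]

theorem pvBraceLoopA_unfold (cs : List Char) (j : Int) :
    pvBraceLoopA cs j =
      if j < (cs.length : Int) then
        (if (PySem.List.pyGet? cs j).getD ' ' = '{' then
          (if pvReadBalanced cs '{' '}' 0 j = -1 then j
           else pvBraceLoopA cs (pvReadBalanced cs '{' '}' 0 j))
         else j)
      else j := by
  by_cases h : j < (cs.length : Int)
  · have ht : ((cs.length : Int) - j).toNat = ((cs.length : Int) - (j + 1)).toNat + 1 := by omega
    rw [pvBraceLoopA, ht]
    show (if j < (cs.length : Int) then _ else j) = _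
    rw [if_pos h, if_pos h]
    by_cases h1 : (PySem.List.pyGet? cs j).getD ' ' = '{'
    · rw [if_pos h1, if_pos h1]
      by_cases he : pvReadBalanced cs '{' '}' 0 j = -1
      · simp [he]
      · simp only [he, if_false]
        rcases pvReadBalanced_pos cs '{' '}' 0 j with h' | h'
        · exact absurd h' he
        · exact pvBraceLoopAGo_irrel cs _ _ _ (by omega) (by omega)
    · rw [if_neg h1, if_neg h1]
  · have ht : ((cs.length : Int) - j).toNat = 0 := by omega
    rw [pvBraceLoopA, ht, if_neg h]; rfl

-- surplus fuel is irrelevant for B's hop loop too (needs 0 ≤ j: the hop target m+1 is past j)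
theorem pvHopGo_irrel (cs : List Char) :
    ∀ (n m : Nat) (j : Int), 0 ≤ j → ((cs.length : Int) - j).toNat ≤ n →
      ((cs.length : Int) - j).toNat ≤ m →
      pvHopGo cs (pvMatchDict cs) n j = pvHopGo cs (pvMatchDict cs) m j := by
  intro n
  induction n with
  | zero =>
    intro m j hj hn hm
    cases m with
    | zero => rfl
    | succ m =>
      show pvHopGo cs (pvMatchDict cs) 0 j = if j < (cs.length : Int) then _ else j
      rw [if_neg (by omega)]; rfl
  | succ n ih =>
    intro m j hj hn hm
    cases m with
    | zero =>
      show (if j < (cs.length : Int) then _ else j) = pvHopGo cs (pvMatchDict cs) 0 j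
      rw [if_neg (by omega)]; rfl
    | succ m =>
      show (if j < (cs.length : Int) then _ else j) = if j < (cs.length : Int) then _ else j
      by_cases h : j < (cs.length : Int)
      · rw [if_pos h, if_pos h]
        by_cases h1 : (PySem.List.pyGet? cs j).getD ' ' = '{'
        · rw [if_pos h1, if_pos h1]
          cases hm' : (pvMatchDict cs).get? j with
          | none => rfl
          | some v =>
            have hfwd := matchDict_forward cs j v hj (pyGet_brace cs j hj h h1) hm'
            exact ih m (v + 1) (by omega) (by omega) (by omega)
        · rw [if_neg h1, if_neg h1]
      · rw [if_neg h, if_neg h]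

theorem pvHop_unfold (cs : List Char) (j : Int) (hj : 0 ≤ j) :
    pvHop cs (pvMatchDict cs) j =
      if j < (cs.length : Int) then
        (if (PySem.List.pyGet? cs j).getD ' ' = '{' then
          (match (pvMatchDict cs).get? j with
           | none => j
           | some m => pvHop cs (pvMatchDict cs) (m + 1))
         else j)
      else j := by
  by_cases h : j < (cs.length : Int)
  · have ht : ((cs.length : Int) - j).toNat = ((cs.length : Int) - (j + 1)).toNat + 1 := by omega
    rw [pvHop, ht]
    show (if j < (cs.length : Int) then _ else j) = _
    rw [if_pos h, if_pos h]
    by_cases h1 : (PySem.List.pyGet? cs j).getD ' ' = '{'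
    · rw [if_pos h1, if_pos h1]
      cases hm' : (pvMatchDict cs).get? j with
      | none => rfl
      | some v =>
        have hfwd := matchDict_forward cs j v hj (pyGet_brace cs j hj h h1) hm'
        exact pvHopGo_irrel cs _ _ _ (by omega) (by omega) (by omega)
    · rw [if_neg h1, if_neg h1]
  · have ht : ((cs.length : Int) - j).toNat = 0 := by omega
    rw [pvHop, ht, if_neg h]; rfl

-- B's table-hopping loop = A's depth-counter group loop
theorem hop_eq_braceLoop (cs : List Char) (j : Int) (hj : 0 ≤ j) :
    pvHop cs (pvMatchDict cs) j = pvBraceLoopA cs j := by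
  rw [pvHop_unfold cs j hj, pvBraceLoopA_unfold]
  by_cases h : j < (cs.length : Int)
  · rw [if_pos h, if_pos h]
    by_cases h1 : (PySem.List.pyGet? cs j).getD ' ' = '{'
    · rw [if_pos h1, if_pos h1]
      have hspec := matchDict_eq_readBalanced cs j hj (pyGet_brace cs j hj h h1)
      cases hm' : (pvMatchDict cs).get? j with
      | none =>
        rw [hm'] at hspec
        have hs2 : pvReadBalanced cs '{' '}' 0 j = -1 := by rw [hspec]
        rw [hs2]; simp
      | some v =>
        rw [hm'] at hspec
        have hs2 : pvReadBalanced cs '{' '}' 0 j = v + 1 := by rw [hspec]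
        have hv : 0 ≤ v := matchDict_nonneg cs j v hm'
        have hfwd := matchDict_forward cs j v hj (pyGet_brace cs j hj h h1) hm'
        rw [hs2, if_neg (by omega)]
        exact hop_eq_braceLoop cs (v + 1) (by omega)
    · rw [if_neg h1, if_neg h1]
  · rw [if_neg h, if_neg h]
termination_by ((cs.length : Int) - j).toNat
decreasing_by omega

-- ===== VERDICT (by name: the statement is the Claim_ definition above) =====
theorem read_latex_command_py_spec : Claim_equal_read_latex_command_py := by
  intro s i _ hpre
  show read_latex_command_py s i = read_latex_command_py_alt s i
  unfold read_latex_command_py read_latex_command_py_alt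
  by_cases hi : i ≥ (s.toList.length : Int)
  · rw [if_pos hi, if_pos hi]
  · rw [if_neg hi, if_neg hi]
    cases PySem.List.pyGet? s.toList i with
    | none => rfl
    | some c =>
      by_cases hc : c ≠ '\\'
      · simp [hc]
      · simp only [hc, if_false]
        have hj0 : (0 : Int) ≤ pvNameLoop s.toList (i + 1) := by
          have h1 := nameLoop_ge s.toList (i + 1)
          have : (0 : Int) ≤ i := hpre
          omega
        rw [hop_eq_braceLoop s.toList _ hj0]
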